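-- pv_equiv track=rewrite | github.com/BrunoGandolfo/cfo-inteligente | backend/app/services/query_fallback.py | _extraer_areas
-- ===== SOURCE A (Python) =====
-- from typing import Optional, List, Tuple
--
-- _AREAS_MAP = {
--     'jurídica': 'Jurídica', 'juridica': 'Jurídica', 'legal': 'Jurídica',
--     'contable': 'Contable', 'contabilidad': 'Contable',
--     'recuperación': 'Recuperación', 'recuperacion': 'Recuperación', 'cobranzas': 'Recuperación',
--     'notarial': 'Notarial', 'notaria': 'Notarial', 'escribanía': 'Notarial', 'escribania': 'Notarial',
-- }
--
-- def _extraer_areas(texto: str) -> List[str]: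
--     """Extrae las áreas mencionadas en el texto."""
--     texto_lower = texto.lower()
--     areas_encontradas = []
--
--     for variante, nombre_oficial in _AREAS_MAP.items():
--         if variante in texto_lower:
--             if nombre_oficial not in areas_encontradas:
--                 areas_encontradas.append(nombre_oficial)
--
--     return areas_encontradas
-- ===== SOURCE B (Python) =====
-- from typing import Optional, List, Tuple
--
-- # Grouped index: official name -> its variant spellings, in first-appearance order.
-- _AREAS_INDEX = {
--     'Jurídica': ['jurídica', 'juridica', 'legal'],
--     'Contable': ['contable', 'contabilidad'],
--     'Recuperación': ['recuperación', 'recuperacion', 'cobranzas'],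
--     'Notarial': ['notarial', 'notaria', 'escribanía', 'escribania'],
-- }
--
-- def _extraer_areas(texto: str) -> List[str]:
--     texto_lower = texto.lower()
--     return [oficial for oficial, variantes in _AREAS_INDEX.items()
--             if any(v in texto_lower for v in variantes)]
-- ===== Notes on version B (the rewrite author's own statement) =====
-- stated objective: simpler
-- what changed: Replaces the variant->official flat map with dedup-by-membership by a grouped index official->variants scanned once per area with any(), so each official name is considered exactly once and the output is a comprehension with no dedup check.
import Mathlib
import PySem

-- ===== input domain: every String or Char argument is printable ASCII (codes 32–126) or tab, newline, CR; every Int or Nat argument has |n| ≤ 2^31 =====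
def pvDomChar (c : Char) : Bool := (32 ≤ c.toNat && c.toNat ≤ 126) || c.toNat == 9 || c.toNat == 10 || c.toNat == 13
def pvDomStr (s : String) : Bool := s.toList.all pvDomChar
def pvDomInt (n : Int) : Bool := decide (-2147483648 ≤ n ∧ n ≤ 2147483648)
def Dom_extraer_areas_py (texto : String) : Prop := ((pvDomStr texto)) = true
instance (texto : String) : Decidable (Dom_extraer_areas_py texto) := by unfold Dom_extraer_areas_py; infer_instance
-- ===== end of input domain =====

-- B replaces A's flat variant→official map plus dedup membership check by a grouped
-- official→variants index filtered once per area (objective: simpler).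

-- ===== PORT A =====
-- _AREAS_MAP as an association list in insertion order
def areasMapA : List (String × String) :=
  [("jurídica", "Jurídica"), ("juridica", "Jurídica"), ("legal", "Jurídica"),
   ("contable", "Contable"), ("contabilidad", "Contable"),
   ("recuperación", "Recuperación"), ("recuperacion", "Recuperación"), ("cobranzas", "Recuperación"),
   ("notarial", "Notarial"), ("notaria", "Notarial"), ("escribanía", "Notarial"), ("escribania", "Notarial")]

-- the body of A's for-loop
def stepA (textoLower : String) (acc : List String) (p : String × String) : List String :=
  if PySem.Str.isIn p.1 textoLower then
    if acc.contains p.2 then acc else acc ++ [p.2]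
  else acc

def extraer_areas_py (texto : String) : List String :=
  let textoLower := PySem.Str.lower texto
  areasMapA.foldl (stepA textoLower) []

-- ===== PORT B =====
-- _AREAS_INDEX: official name → its variant spellings, in first-appearance order
def areasIndexB : List (String × List String) :=
  [("Jurídica", ["jurídica", "juridica", "legal"]),
   ("Contable", ["contable", "contabilidad"]),
   ("Recuperación", ["recuperación", "recuperacion", "cobranzas"]),
   ("Notarial", ["notarial", "notaria", "escribanía", "escribania"])]

def extraer_areas_py_alt (texto : String) : List String :=
  let textoLower := PySem.Str.lower texto
  (areasIndexB.filter (fun g => g.2.any (fun v => PySem.Str.isIn v textoLower))).map Prod.fst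

-- ===== PRECONDITION & SPEC =====
def Spec_extraer_areas_py (texto : String) (out : List String) : Prop := out = extraer_areas_py_alt texto
instance (texto : String) (out : List String) : Decidable (Spec_extraer_areas_py texto out) := by unfold Spec_extraer_areas_py; infer_instance

-- ===== CLAIM (what is proved, stated in full; the proofs are below) =====
def Claim_equal_extraer_areas_py : Prop := ∀ (texto : String), Dom_extraer_areas_py texto → Spec_extraer_areas_py texto (extraer_areas_py texto)

-- ===== LEMMAS AND PROOFS =====

-- Once an official name is already in the accumulator, its whole variant group leaves it unchanged.
theorem foldA_group_mem (tl o : String) (vs : List String) (acc : List String)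
    (h : acc.contains o = true) :
    (vs.map (fun v => (v, o))).foldl (stepA tl) acc = acc := by
  induction vs with
  | nil => rfl
  | cons v vs ih =>
    simp only [List.map, List.foldl, stepA, h]
    split_ifs <;> exact ih

-- A contiguous variant group for an official not yet collected appends it iff any variant matches.
theorem foldA_group (tl o : String) (vs : List String) (acc : List String)
    (h : acc.contains o = false) :
    (vs.map (fun v => (v, o))).foldl (stepA tl) acc
      = if vs.any (fun v => PySem.Str.isIn v tl) then acc ++ [o] else acc := by
  induction vs with
  | nil => rfl
  | cons v vs ih =>
    simp only [List.map, List.foldl, List.any_cons]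
    by_cases hv : PySem.Str.isIn v tl = true
    · have hmem : (acc ++ [o]).contains o = true := by simp
      simp only [stepA, hv, h, if_true, Bool.false_eq_true, if_false,
        foldA_group_mem tl o vs _ hmem, Bool.true_or, if_true]
    · simp only [stepA, hv, Bool.false_eq_true, if_false, ih,
        Bool.false_or]

theorem extraer_areas_eq (texto : String) : extraer_areas_py texto = extraer_areas_py_alt texto := by
  unfold extraer_areas_py extraer_areas_py_alt
  generalize PySem.Str.lower texto = tl
  have hsplit : areasMapA
      = (["jurídica", "juridica", "legal"].map (fun v => (v, "Jurídica")))
        ++ (["contable", "contabilidad"].map (fun v => (v, "Contable")))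
        ++ (["recuperación", "recuperacion", "cobranzas"].map (fun v => (v, "Recuperación")))
        ++ (["notarial", "notaria", "escribanía", "escribania"].map (fun v => (v, "Notarial"))) := by
    rfl
  simp only [areasIndexB, List.filter_cons, List.filter_nil]
  rw [hsplit, List.foldl_append, List.foldl_append, List.foldl_append]
  rw [foldA_group tl "Jurídica" _ [] rfl]
  by_cases h1 : (["jurídica", "juridica", "legal"].any (fun v => PySem.Str.isIn v tl)) = true <;>
  simp only [h1, if_true, if_false, Bool.false_eq_true] <;>
  rw [foldA_group tl "Contable" _ _ rfl] <;>
  (by_cases h2 : (["contable", "contabilidad"].any (fun v => PySem.Str.isIn v tl)) = true <;>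
   simp only [h2, if_true, if_false, Bool.false_eq_true]) <;>
  rw [foldA_group tl "Recuperación" _ _ rfl] <;>
  (by_cases h3 : (["recuperación", "recuperacion", "cobranzas"].any (fun v => PySem.Str.isIn v tl)) = true <;>
   simp only [h3, if_true, if_false, Bool.false_eq_true]) <;>
  rw [foldA_group tl "Notarial" _ _ rfl] <;>
  (by_cases h4 : (["notarial", "notaria", "escribanía", "escribania"].any (fun v => PySem.Str.isIn v tl)) = true <;>
   simp only [h4, if_true, if_false, Bool.false_eq_true]) <;>
  rfl

-- ===== VERDICT (by name: the statement is the Claim_ definition above) =====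
theorem extraer_areas_py_spec : Claim_equal_extraer_areas_py := by
  intro texto _
  unfold Spec_extraer_areas_py
  exact extraer_areas_eq texto
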